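-- pv_equiv track=rewrite | github.com/peterbikes/100_Python_Projects | 100 Python Projects/Jacobsthal Numbers/jacobsthal_numbers.py | find_next_jacob
-- ===== SOURCE A (Python) =====
-- def find_next_jacob(number):
--     if number == 0:
--         return 1
--     if number == 1:
--         return 3
--     prev = 1
--     i = 3
--     swap = 0
--     while i <= number:
--         swap = i
--         i = i + (2*prev)
--         prev = swap
--     return i
-- ===== SOURCE B (Python) =====
-- def find_next_jacob(number):
--     if number == 0:
--         return 1
--     if number == 1:
--         return 3
--     n = 3
--     while True:
--         j = (2 ** n - (-1) ** n) // 3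
--         if j > number:
--             return j
--         n += 1
-- ===== Notes on version B (the rewrite author's own statement) =====
-- stated objective: alternative
-- what changed: Replaces the prev/swap two-term recurrence loop by a search that computes each Jacobsthal number directly from the closed form (2**n - (-1)**n)//3, keeping A's two guards and the n=3 starting point.
import Mathlib
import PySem

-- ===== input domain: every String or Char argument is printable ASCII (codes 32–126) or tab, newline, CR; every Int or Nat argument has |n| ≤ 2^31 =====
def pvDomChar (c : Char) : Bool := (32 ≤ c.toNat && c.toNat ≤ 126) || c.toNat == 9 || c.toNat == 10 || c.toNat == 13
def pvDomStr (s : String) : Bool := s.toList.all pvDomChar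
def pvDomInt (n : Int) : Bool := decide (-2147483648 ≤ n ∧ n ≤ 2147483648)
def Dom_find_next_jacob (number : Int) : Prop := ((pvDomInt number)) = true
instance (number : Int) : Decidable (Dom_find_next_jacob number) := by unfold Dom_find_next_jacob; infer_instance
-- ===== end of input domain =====

-- B replaces A's prev/swap recurrence loop by a search computing each Jacobsthal
-- number from the closed form (2**n - (-1)**n)//3; same values, no speed claim.

-- ===== PORT A =====
-- A's while loop: state (prev, i); the `1 ≤ prev` conjunct is a totality guard only
-- (it holds on every state the function reaches, where prev starts at 1 and is then a
-- previous i ≥ 3); Python's `swap` is the temporary realised by the argument order.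
def findJacobLoopA (number prev i : Int) : Int :=
  if _h : i ≤ number ∧ 1 ≤ prev then findJacobLoopA number i (i + 2 * prev) else i
termination_by (number + 1 - i).toNat
decreasing_by omega

def find_next_jacob (number : Int) : Int :=
  if number = 0 then 1
  else if number = 1 then 3
  else findJacobLoopA number 1 3

-- ===== PORT B =====
-- termination lemmas for B's loop (cited by name in decreasing_by)
def jacB : Nat → Int
  | 0 => 1
  | 1 => 3
  | (k + 2) => jacB (k + 1) + 2 * jacB k

theorem jacB_pos : ∀ k, 1 ≤ jacB k := by
  intro k
  induction k using Nat.twoStepInduction with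
  | zero => simp [jacB]
  | one => simp [jacB]
  | more k ih1 ih2 => simp only [jacB]; omega

theorem jacB_lt (k : Nat) : jacB k < jacB (k + 1) := by
  match k with
  | 0 => simp [jacB]
  | (k + 1) =>
    have := jacB_pos k
    have := jacB_pos (k + 1)
    simp only [jacB]; omega

theorem jacB_closed (k : Nat) : 3 * jacB k = 2 ^ (k + 2) - (-1 : Int) ^ (k + 2) := by
  induction k using Nat.twoStepInduction with
  | zero => simp [jacB]
  | one => norm_num [jacB]
  | more k ih1 ih2 =>
    simp only [jacB]
    have e1 : (2 : Int) ^ (k + 2 + 2) = 2 * (2 * 2 ^ (k + 2)) := by ring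
    have e2 : (-1 : Int) ^ (k + 2 + 2) = (-1 : Int) ^ (k + 2) := by ring
    have e3 : (2 : Int) ^ (k + 1 + 2) = 2 * 2 ^ (k + 2) := by ring
    have e4 : (-1 : Int) ^ (k + 1 + 2) = -(-1 : Int) ^ (k + 2) := by ring
    omega

theorem jacB_floordiv (k : Nat) :
    PySem.Int.floordiv (2 ^ (k + 3) - (-1 : Int) ^ (k + 3)) 3 = jacB (k + 1) := by
  have h : 3 * jacB (k + 1) = 2 ^ (k + 3) - (-1 : Int) ^ (k + 3) := by
    rw [show k + 3 = k + 1 + 2 from rfl]; exact jacB_closed (k + 1)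
  rw [show (2 ^ (k + 3) - (-1 : Int) ^ (k + 3)) = 3 * jacB (k + 1) by omega,
      PySem.Int.floordiv_eq_ediv_of_pos (by norm_num)]
  exact Int.mul_ediv_cancel_left _ (by norm_num)

-- B's while-True loop, counter n = k + 3 (n starts at 3 and only increases)
def findJacobLoopB (number : Int) (k : Nat) : Int :=
  if number < PySem.Int.floordiv (2 ^ (k + 3) - (-1 : Int) ^ (k + 3)) 3 then
    PySem.Int.floordiv (2 ^ (k + 3) - (-1 : Int) ^ (k + 3)) 3
  else findJacobLoopB number (k + 1)
termination_by (number + 1 - jacB (k + 1)).toNat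
decreasing_by
  rename_i h
  rw [jacB_floordiv] at h
  have h1 := jacB_lt (k + 1)
  omega

def find_next_jacob_alt (number : Int) : Int :=
  if number = 0 then 1
  else if number = 1 then 3
  else findJacobLoopB number 0

-- ===== PRECONDITION & SPEC =====
def Spec_find_next_jacob (number : Int) (out : Int) : Prop := out = find_next_jacob_alt number
instance (number : Int) (out : Int) : Decidable (Spec_find_next_jacob number out) := by unfold Spec_find_next_jacob; infer_instance

-- ===== CLAIM (what is proved, stated in full; the proofs are below) =====
def Claim_equal_find_next_jacob : Prop := ∀ (number : Int), Dom_find_next_jacob number → Spec_find_next_jacob number (find_next_jacob number)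

-- ===== LEMMAS AND PROOFS =====

-- A's state after any number of iterations is (jacB k, jacB (k+1)); both loops step in sync.
theorem loop_eq (m : Nat) : ∀ (number : Int) (k : Nat),
    (number + 1 - jacB (k + 1)).toNat ≤ m →
    findJacobLoopA number (jacB k) (jacB (k + 1)) = findJacobLoopB number k := by
  induction m with
  | zero =>
    intro number k hm
    have hp := jacB_pos (k + 1)
    have hgt : number < jacB (k + 1) := by omega
    rw [findJacobLoopA.eq_def, findJacobLoopB.eq_def, jacB_floordiv, if_pos hgt,
        dif_neg (by omega : ¬(jacB (k + 1) ≤ number ∧ 1 ≤ jacB k))]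
  | succ m ih =>
    intro number k hm
    by_cases hle : jacB (k + 1) ≤ number
    · have hp := jacB_pos k
      have hc : jacB (k + 1) ≤ number ∧ 1 ≤ jacB k := ⟨hle, hp⟩
      rw [findJacobLoopA.eq_def, findJacobLoopB.eq_def, jacB_floordiv,
          dif_pos hc, if_neg (not_lt.mpr hle)]
      have hstep : jacB (k + 1) + 2 * jacB k = jacB (k + 2) := rfl
      rw [hstep]
      apply ih
      have := jacB_lt (k + 1)
      omega
    · have hgt : number < jacB (k + 1) := by omega
      rw [findJacobLoopA.eq_def, findJacobLoopB.eq_def, jacB_floordiv, if_pos hgt,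
          dif_neg (by omega : ¬(jacB (k + 1) ≤ number ∧ 1 ≤ jacB k))]

-- ===== VERDICT (by name: the statement is the Claim_ definition above) =====
theorem find_next_jacob_spec : Claim_equal_find_next_jacob := by
  intro number _
  unfold Spec_find_next_jacob find_next_jacob find_next_jacob_alt
  split_ifs with h0 h1
  · rfl
  · rfl
  · have h : findJacobLoopA number (jacB 0) (jacB 1) = findJacobLoopB number 0 :=
      loop_eq (number + 1 - jacB 1).toNat number 0 le_rfl
    simpa [jacB] using h
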